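-- pv_equiv track=rewrite | github.com/Qvazi141/pvt_python | homework/homework_4/3.py | rows_count
-- ===== SOURCE A (Python) =====
-- def rows_count(string):
--     numbers, row_max_len = [], string[0]
--     for i in range(len(string)):
--         if len(row_max_len) < len(string[i]):
--             row_max_len = string[i]
--             numbers = [i+1]
--         elif len(row_max_len) == len(string[i]):
--             numbers.append(i+1)
--     return numbers
-- ===== SOURCE B (Python) =====
-- def rows_count(string):
--     m = len(string[0])
--     for s in string:
--         if len(s) > m:
--             m = len(s)
--     return [i + 1 for i, s in enumerate(string) if len(s) == m]
-- ===== Notes on version B (the rewrite author's own statement) =====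
-- stated objective: simpler
-- what changed: Replaces A's single pass that tracks the longest string seen so far and rebuilds/extends the index list on the fly with two plain passes: first compute the maximum length, then a comprehension collecting the 1-based indices attaining it.
import Mathlib
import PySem

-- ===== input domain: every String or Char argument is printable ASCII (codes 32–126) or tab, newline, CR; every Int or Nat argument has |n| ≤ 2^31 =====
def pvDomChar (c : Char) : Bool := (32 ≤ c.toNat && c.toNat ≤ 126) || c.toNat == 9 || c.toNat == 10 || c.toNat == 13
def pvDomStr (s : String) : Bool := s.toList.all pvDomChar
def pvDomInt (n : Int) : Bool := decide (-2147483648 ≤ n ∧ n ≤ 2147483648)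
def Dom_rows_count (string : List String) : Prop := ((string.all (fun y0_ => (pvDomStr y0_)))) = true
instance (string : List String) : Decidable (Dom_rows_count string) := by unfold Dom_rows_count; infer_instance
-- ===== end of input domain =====

-- B computes the max length in one pass and then collects matching 1-based indices in a
-- second pass (two simple passes), instead of A's single pass rebuilding the index list.


-- ===== PORT A =====
-- A's for-loop over range(len(string)), as structural recursion over enumerate(string)
-- with the same state (numbers, row_max_len), branches in the same order.
def rowsALoop (ps : List (Int × String)) (numbers : List Int) (rml : String) : List Int :=
  match ps with
  | [] => numbers
  | (i, s) :: rest =>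
    if PySem.Str.len rml < PySem.Str.len s then rowsALoop rest [i + 1] s
    else if PySem.Str.len rml == PySem.Str.len s then rowsALoop rest (numbers ++ [i + 1]) rml
    else rowsALoop rest numbers rml

def rows_count (string : List String) : List Int :=
  match string with
  | [] => []  -- unreachable under Pre_: string[0] raises IndexError in Python
  | s0 :: _ => rowsALoop (PySem.List.enumerate string) [] s0

-- ===== PORT B =====
def rows_count_alt (string : List String) : List Int :=
  match string with
  | [] => []  -- unreachable under Pre_: len(string[0]) raises IndexError in Python
  | s0 :: _ =>
    let m := string.foldl (fun acc s => if acc < PySem.Str.len s then PySem.Str.len s else acc)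
      (PySem.Str.len s0)
    (PySem.List.enumerate string).filterMap
      (fun p => if PySem.Str.len p.2 == m then some (p.1 + 1) else none)

-- ===== PRECONDITION & SPEC =====
-- A evaluates string[0], which raises IndexError on the empty list; B raises there too.
def Pre_rows_count (string : List String) : Prop := string ≠ []
instance (string : List String) : Decidable (Pre_rows_count string) := by unfold Pre_rows_count; infer_instance

def pvWitness_rows_count : List String := ["ab", "c", "xy"]

def Spec_rows_count (string : List String) (out : List Int) : Prop := out = rows_count_alt string
instance (string : List String) (out : List Int) : Decidable (Spec_rows_count string out) := by unfold Spec_rows_count; infer_instance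

-- ===== CLAIM (what is proved, stated in full; the proofs are below) =====
def Claim_equal_rows_count : Prop := ∀ (string : List String), Dom_rows_count string → Pre_rows_count string → Spec_rows_count string (rows_count string)

-- ===== LEMMAS AND PROOFS =====

-- pure-Int version of A's loop (index, length) pairs
def loopL (ps : List (Int × Int)) (numbers : List Int) (r : Int) : List Int :=
  match ps with
  | [] => numbers
  | (i, s) :: rest =>
    if r < s then loopL rest [i + 1] s
    else if r = s then loopL rest (numbers ++ [i + 1]) r
    else loopL rest numbers r

def lenP (p : Int × String) : Int × Int := (p.1, PySem.Str.len p.2)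

def maxL (ps : List (Int × Int)) : Int := ps.foldr (fun p acc => max p.2 acc) 0

def maxLenR (l : List String) : Int :=
  l.foldr (fun s acc => max (PySem.Str.len s) acc) 0

theorem strLen_nonneg (s : String) : 0 ≤ PySem.Str.len s := by
  rw [PySem.Str.len_eq]; exact_mod_cast Nat.zero_le _

theorem rowsALoop_eq_loopL (ps : List (Int × String)) (ns : List Int) (r : String) :
    rowsALoop ps ns r = loopL (ps.map lenP) ns (PySem.Str.len r) := by
  induction ps generalizing ns r with
  | nil => rfl
  | cons p rest ih =>
    obtain ⟨i, s⟩ := p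
    simp only [rowsALoop, loopL, List.map_cons, lenP, beq_iff_eq]
    split_ifs <;> apply ih

theorem maxL_nonneg (ps : List (Int × Int)) : 0 ≤ maxL ps := by
  induction ps with
  | nil => simp [maxL]
  | cons p rest ih => simp only [maxL, List.foldr_cons] at ih ⊢; omega

theorem maxL_cons (p : Int × Int) (rest : List (Int × Int)) :
    maxL (p :: rest) = max p.2 (maxL rest) := by
  simp only [maxL, List.foldr_cons]

-- characterisation of A's loop on the Int level
theorem loopL_char (ps : List (Int × Int)) (ns : List Int) (r : Int)
    (hr : 0 ≤ r) (hps : ∀ p ∈ ps, 0 ≤ p.2) :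
    loopL ps ns r =
      (if maxL ps ≤ r then ns else []) ++
        ps.filterMap (fun p => if p.2 = max r (maxL ps) then some (p.1 + 1) else none) := by
  induction ps generalizing ns r with
  | nil =>
    simp only [loopL, maxL, List.foldr_nil, List.filterMap_nil, List.append_nil]
    rw [if_pos hr]
  | cons p rest ih =>
    obtain ⟨i, s⟩ := p
    have hs0 : 0 ≤ s := hps (i, s) (List.mem_cons_self)
    have hrest : ∀ q ∈ rest, 0 ≤ q.2 := fun q hq => hps q (List.mem_cons_of_mem _ hq)
    have hmr := maxL_nonneg rest
    rw [maxL_cons, List.filterMap_cons]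
    simp only [loopL]
    by_cases h1 : r < s
    · rw [if_pos h1, ih _ _ hs0 hrest]
      rw [if_neg (show ¬ max s (maxL rest) ≤ r by omega)]
      have hM : max r (max s (maxL rest)) = max s (maxL rest) := by omega
      rw [hM]
      by_cases hc : maxL rest ≤ s
      · have hsM : max s (maxL rest) = s := by omega
        rw [if_pos hc, hsM, if_pos rfl]
        simp
      · have hne : ¬ s = max s (maxL rest) := by omega
        rw [if_neg hc, if_neg hne]
    · rw [if_neg h1]
      by_cases h2 : r = s
      · rw [if_pos h2, ih _ _ hr hrest]
        have hM : max r (max s (maxL rest)) = max r (maxL rest) := by omega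
        rw [hM]
        by_cases hc : maxL rest ≤ r
        · have hc1 : max s (maxL rest) ≤ r := by omega
          have hs_eq : s = max r (maxL rest) := by omega
          rw [if_pos hc, if_pos hc1, if_pos hs_eq]
          simp
        · have hc1 : ¬ max s (maxL rest) ≤ r := by omega
          have hne : ¬ s = max r (maxL rest) := by omega
          rw [if_neg hc, if_neg hc1, if_neg hne]
      · rw [if_neg h2, ih _ _ hr hrest]
        have hs : s < r := by omega
        have hM : max r (max s (maxL rest)) = max r (maxL rest) := by omega
        have hne : ¬ s = max r (maxL rest) := by omega
        rw [hM, if_neg hne]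
        by_cases hc : maxL rest ≤ r
        · rw [if_pos hc, if_pos (show max s (maxL rest) ≤ r by omega)]
        · rw [if_neg hc, if_neg (show ¬ max s (maxL rest) ≤ r by omega)]

theorem maxLenR_cons (x : String) (rest : List String) :
    maxLenR (x :: rest) = max (PySem.Str.len x) (maxLenR rest) := by
  simp only [maxLenR, List.foldr_cons]

theorem maxL_map_enum (l : List String) (s : Int) :
    maxL ((PySem.List.enumerate l s).map lenP) = maxLenR l := by
  induction l generalizing s with
  | nil => rfl
  | cons x rest ih =>
    rw [PySem.List.enumerate_cons, List.map_cons, maxL_cons, ih, maxLenR_cons]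
    rfl

theorem maxLenR_nonneg (l : List String) : 0 ≤ maxLenR l := by
  induction l with
  | nil => simp [maxLenR]
  | cons x rest ih =>
    have := strLen_nonneg x
    rw [maxLenR_cons]; omega

-- B's first pass equals max init (maxLenR l) for nonnegative init
theorem foldl_max_eq (l : List String) (init : Int) (h : 0 ≤ init) :
    l.foldl (fun acc s => if acc < PySem.Str.len s then PySem.Str.len s else acc) init
      = max init (maxLenR l) := by
  induction l generalizing init with
  | nil =>
    simp only [List.foldl_nil, maxLenR, List.foldr_nil]
    omega
  | cons x rest ih =>
    simp only [List.foldl_cons]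
    have hx := strLen_nonneg x
    rw [maxLenR_cons]
    by_cases hc : init < PySem.Str.len x
    · rw [if_pos hc, ih _ hx]; omega
    · rw [if_neg hc, ih _ h]; omega

theorem rows_count_spec : Claim_equal_rows_count := by
  intro string _ hpre
  unfold Spec_rows_count
  match string with
  | [] => exact absurd rfl hpre
  | s0 :: t =>
    have h0 := strLen_nonneg s0
    have hps : ∀ p ∈ (PySem.List.enumerate (s0 :: t)).map lenP, 0 ≤ p.2 := by
      intro p hp
      simp only [List.mem_map] at hp
      obtain ⟨q, _, rfl⟩ := hp
      exact strLen_nonneg q.2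
    have hge : PySem.Str.len s0 ≤ maxLenR (s0 :: t) := by
      have := maxLenR_nonneg t
      rw [maxLenR_cons]; omega
    have hMm : max (PySem.Str.len s0) (maxLenR (s0 :: t)) = maxLenR (s0 :: t) := by omega
    have halt : rows_count_alt (s0 :: t) = (PySem.List.enumerate (s0 :: t)).filterMap
        (fun p => if PySem.Str.len p.2 == maxLenR (s0 :: t) then some (p.1 + 1) else none) := by
      show (PySem.List.enumerate (s0 :: t)).filterMap
          (fun p => if PySem.Str.len p.2 ==
            ((s0 :: t).foldl (fun acc s => if acc < PySem.Str.len s then PySem.Str.len s else acc)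
              (PySem.Str.len s0)) then some (p.1 + 1) else none) = _
      rw [foldl_max_eq _ _ h0, hMm]
    show rowsALoop (PySem.List.enumerate (s0 :: t)) [] s0 = _
    rw [rowsALoop_eq_loopL, loopL_char _ _ _ h0 hps, halt]
    simp only [maxL_map_enum, hMm, ite_self, List.nil_append, List.filterMap_map]
    apply List.filterMap_congr
    intro p _
    simp only [Function.comp, lenP, beq_iff_eq]
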